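-- pv_equiv track=rewrite | github.com/totoLab/code-ingegneria-informatica | fondamentiDiInformatica1/simulazioni_esame/29062018/es3.py | dizionario_settimana
-- ===== SOURCE A (Python) =====
-- def aggiungi_in_dizionario(d, elemento, inizializzato, valore):
--     if elemento not in d:
--         d[elemento] = inizializzato
--     d[elemento] += valore
--
--     return d
--
-- def dizionario_settimana(P):
--     d_settimana = {}
--
--     for prenotazione in P:
--         aula = prenotazione[0]
--         giorno = prenotazione[1]
--         prenotati = prenotazione[2]
--         if giorno not in d_settimana:
--             d_settimana[giorno] = {}
--
--         d_settimana[giorno] = aggiungi_in_dizionario(d_settimana[giorno], aula, 0, prenotati)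
--
--     return d_settimana
-- ===== SOURCE B (Python) =====
-- def dizionario_settimana(P):
--     # pass 1: flatten — total per (giorno, aula)
--     flat = {}
--     for aula, giorno, prenotati in P:
--         k = (giorno, aula)
--         flat[k] = flat.get(k, 0) + prenotati
--     # pass 2: restructure the flat table into the nested day -> room -> count dict
--     out = {}
--     for (giorno, aula), tot in flat.items():
--         if giorno not in out:
--             out[giorno] = {}
--         out[giorno][aula] = tot
--     return out
-- ===== Notes on version B (the rewrite author's own statement) =====
-- stated objective: alternative
-- what changed: B replaces A's single interleaved nested-dict build with two separate passes: first aggregate totals into a flat dict keyed by (giorno, aula), then restructure that flat table into the nested day->room->count dict.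
import Mathlib
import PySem

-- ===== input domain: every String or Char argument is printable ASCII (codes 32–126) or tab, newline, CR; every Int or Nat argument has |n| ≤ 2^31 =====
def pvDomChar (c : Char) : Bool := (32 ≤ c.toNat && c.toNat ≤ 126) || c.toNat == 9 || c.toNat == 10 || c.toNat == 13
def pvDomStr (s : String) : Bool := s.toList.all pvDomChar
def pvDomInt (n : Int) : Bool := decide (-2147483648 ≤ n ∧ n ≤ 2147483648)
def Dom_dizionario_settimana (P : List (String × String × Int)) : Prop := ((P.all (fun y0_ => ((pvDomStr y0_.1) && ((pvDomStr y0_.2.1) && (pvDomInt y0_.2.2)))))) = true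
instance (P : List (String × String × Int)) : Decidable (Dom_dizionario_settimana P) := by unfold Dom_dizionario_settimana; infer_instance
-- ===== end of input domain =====

-- B replaces A's single interleaved nested-dict build with two passes (aggregate into a
-- flat (giorno, aula) → total dict, then restructure into the nested dict); same cost.

-- ===== PORT A =====
def aggiungi_in_dizionario (d : PySem.Dict String Int) (elemento : String)
    (inizializzato valore : Int) : PySem.Dict String Int :=
  let d' := if d.contains elemento then d else d.insert elemento inizializzato
  d'.insert elemento (d'.getD elemento 0 + valore)

def dizionario_settimana (P : List (String × String × Int)) : List (String × List (String × Int)) :=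
  (P.foldl
    (fun d_settimana prenotazione =>
      let aula := prenotazione.1
      let giorno := prenotazione.2.1
      let prenotati := prenotazione.2.2
      let d := if d_settimana.contains giorno then d_settimana
               else d_settimana.insert giorno PySem.Dict.empty
      d.insert giorno (aggiungi_in_dizionario (d.getD giorno PySem.Dict.empty) aula 0 prenotati))
    PySem.Dict.empty).items.map (fun q => (q.1, q.2.items))

-- ===== PORT B =====
def dizionario_settimana_alt (P : List (String × String × Int)) : List (String × List (String × Int)) :=
  -- pass 1: flat table keyed by (giorno, aula)
  let flat := P.foldl
    (fun f p => f.insert (p.2.1, p.1) (f.getD (p.2.1, p.1) 0 + p.2.2))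
    (PySem.Dict.empty : PySem.Dict (String × String) Int)
  -- pass 2: restructure the flat table into the nested dict
  (flat.items.foldl
    (fun out it =>
      let giorno := it.1.1
      let aula := it.1.2
      let out' := if out.contains giorno then out else out.insert giorno PySem.Dict.empty
      out'.insert giorno ((out'.getD giorno PySem.Dict.empty).insert aula it.2))
    PySem.Dict.empty).items.map (fun q => (q.1, q.2.items))

-- ===== PRECONDITION & SPEC =====
def Spec_dizionario_settimana (P : List (String × String × Int)) (out : List (String × List (String × Int))) : Prop := out = dizionario_settimana_alt P
instance (P : List (String × String × Int)) (out : List (String × List (String × Int))) : Decidable (Spec_dizionario_settimana P out) := by unfold Spec_dizionario_settimana; infer_instance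

-- ===== CLAIM (what is proved, stated in full; the proofs are below) =====
def Claim_equal_dizionario_settimana : Prop := ∀ (P : List (String × String × Int)), Dom_dizionario_settimana P → Spec_dizionario_settimana P (dizionario_settimana P)

-- ===== LEMMAS AND PROOFS =====

-- collapsed form of A's loop body
def stepA (d : PySem.Dict String (PySem.Dict String Int)) (p : String × String × Int) :
    PySem.Dict String (PySem.Dict String Int) :=
  d.insert p.2.1 ((d.getD p.2.1 PySem.Dict.empty).insert p.1
    ((d.getD p.2.1 PySem.Dict.empty).getD p.1 0 + p.2.2))

-- collapsed form of B's restructuring loop body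
def stepN (n : PySem.Dict String (PySem.Dict String Int)) (x : (String × String) × Int) :
    PySem.Dict String (PySem.Dict String Int) :=
  n.insert x.1.1 ((n.getD x.1.1 PySem.Dict.empty).insert x.1.2 x.2)

def RB (l : List ((String × String) × Int)) (n : PySem.Dict String (PySem.Dict String Int)) :
    PySem.Dict String (PySem.Dict String Int) := l.foldl stepN n

def stepF (f : PySem.Dict (String × String) Int) (p : String × String × Int) :
    PySem.Dict (String × String) Int :=
  f.insert (p.2.1, p.1) (f.getD (p.2.1, p.1) 0 + p.2.2)

def flatD (P : List (String × String × Int)) : PySem.Dict (String × String) Int :=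
  P.foldl stepF PySem.Dict.empty

def nestA (P : List (String × String × Int)) : PySem.Dict String (PySem.Dict String Int) :=
  P.foldl stepA PySem.Dict.empty

lemma aggiungi_collapse (d : PySem.Dict String Int) (el : String) (v : Int) :
    aggiungi_in_dizionario d el 0 v = d.insert el (d.getD el 0 + v) := by
  unfold aggiungi_in_dizionario
  by_cases h : d.contains el = true
  · simp [h]
  · simp only [h, Bool.false_eq_true, if_false]
    rw [PySem.Dict.getD_insert_self, PySem.Dict.insert_insert_self,
        PySem.Dict.getD_of_not_contains _ _ (by simpa using h)]

lemma portA_body_eq (d : PySem.Dict String (PySem.Dict String Int)) (p : String × String × Int) :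
    (let aula := p.1
     let giorno := p.2.1
     let prenotati := p.2.2
     let d' := if d.contains giorno then d else d.insert giorno PySem.Dict.empty
     d'.insert giorno (aggiungi_in_dizionario (d'.getD giorno PySem.Dict.empty) aula 0 prenotati))
    = stepA d p := by
  unfold stepA
  by_cases h : d.contains p.2.1 = true
  · simp [h, aggiungi_collapse]
  · have hb : d.contains p.2.1 = false := by simpa using h
    simp only [h, Bool.false_eq_true, if_false, aggiungi_collapse]
    rw [PySem.Dict.getD_insert_self, PySem.Dict.insert_insert_self,
        PySem.Dict.getD_of_not_contains d PySem.Dict.empty hb,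
        PySem.Dict.getD_empty]

lemma portB_body_eq (n : PySem.Dict String (PySem.Dict String Int)) (x : (String × String) × Int) :
    (let giorno := x.1.1
     let aula := x.1.2
     let out' := if n.contains giorno then n else n.insert giorno PySem.Dict.empty
     out'.insert giorno ((out'.getD giorno PySem.Dict.empty).insert aula x.2))
    = stepN n x := by
  unfold stepN
  by_cases h : n.contains x.1.1 = true
  · simp [h]
  · simp only [h, Bool.false_eq_true, if_false]
    rw [PySem.Dict.getD_insert_self, PySem.Dict.insert_insert_self,
        PySem.Dict.getD_of_not_contains _ _ (by simpa using h)]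

lemma RB_append_singleton (l : List ((String × String) × Int)) (x : (String × String) × Int)
    (n : PySem.Dict String (PySem.Dict String Int)) :
    RB (l ++ [x]) n = stepN (RB l n) x := by
  simp [RB, List.foldl_append]

-- dict insert at a contained key commutes with insert at another key
lemma insert_insert_comm_of_contains {κ ν : Type} [BEq κ] [LawfulBEq κ]
    (d : PySem.Dict κ ν) {k k' : κ} (v w : ν) (h : d.contains k = true) (hne : k' ≠ k) :
    (d.insert k v).insert k' w = (d.insert k' w).insert k v := by
  have hkk' : (k' == k) = false := by simp [hne]
  have hk'k : (k == k') = false := by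
    simp only [beq_eq_false_iff_ne, ne_eq]
    exact fun e => hne e.symm
  have h1 : (d.insert k v).contains k' = d.contains k' := by
    rw [PySem.Dict.contains_insert]; simp [hkk']
  have h2 : (d.insert k' w).contains k = true := by
    rw [PySem.Dict.contains_insert]; simp [h]
  apply PySem.Dict.ext
  by_cases hc' : d.contains k' = true
  · have hA : (d.insert k v).contains k' = true := by rw [h1]; exact hc'
    rw [PySem.Dict.items_insert_of_contains _ _ hA,
        PySem.Dict.items_insert_of_contains _ _ h,
        PySem.Dict.items_insert_of_contains _ _ h2,
        PySem.Dict.items_insert_of_contains _ _ hc',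
        List.map_map, List.map_map]
    apply List.map_congr_left
    intro q _
    simp only [Function.comp]
    by_cases hq : (q.1 == k) = true <;> by_cases hq' : (q.1 == k') = true <;>
      simp [hq, hq', hkk', hk'k]
    · exact absurd (by rw [← (beq_iff_eq).mp hq, (beq_iff_eq).mp hq']) hne
  · have hA : (d.insert k v).contains k' = false := by rw [h1]; simpa using hc'
    rw [PySem.Dict.items_insert_of_not_contains _ _ hA,
        PySem.Dict.items_insert_of_contains _ _ h,
        PySem.Dict.items_insert_of_contains _ _ h2,
        PySem.Dict.items_insert_of_not_contains _ _ (by simpa using hc'),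
        List.map_append]
    simp [hkk']

lemma outer_contains_RB (g : String) :
    ∀ (l : List ((String × String) × Int)) (n : PySem.Dict String (PySem.Dict String Int)),
      ((RB l n).contains g = true) ↔ (n.contains g = true ∨ ∃ p ∈ l, p.1.1 = g) := by
  intro l
  induction l with
  | nil => intro n; simp [RB]
  | cons x l ih =>
    intro n
    have : RB (x :: l) n = RB l (stepN n x) := rfl
    rw [this, ih]
    simp only [stepN, PySem.Dict.contains_insert, Bool.or_eq_true, beq_iff_eq, List.mem_cons]
    constructor
    · rintro (⟨h | h⟩ | ⟨p, hp, he⟩)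
      · exact Or.inr ⟨x, Or.inl rfl, h.symm⟩
      · exact Or.inl h
      · exact Or.inr ⟨p, Or.inr hp, he⟩
    · rintro (h | ⟨p, (rfl | hp), he⟩)
      · exact Or.inl (Or.inr h)
      · exact Or.inl (Or.inl he.symm)
      · exact Or.inr ⟨p, hp, he⟩

lemma inner_contains_RB (g a : String) :
    ∀ (l : List ((String × String) × Int)) (n : PySem.Dict String (PySem.Dict String Int)),
      (((RB l n).getD g PySem.Dict.empty).contains a = true) ↔
        (((n.getD g PySem.Dict.empty).contains a = true) ∨ ∃ p ∈ l, p.1 = (g, a)) := by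
  intro l
  induction l with
  | nil => intro n; simp [RB]
  | cons x l ih =>
    intro n
    have hr : RB (x :: l) n = RB l (stepN n x) := rfl
    rw [hr, ih]
    have hstep : ((stepN n x).getD g PySem.Dict.empty).contains a = true ↔
        ((n.getD g PySem.Dict.empty).contains a = true ∨ x.1 = (g, a)) := by
      by_cases hg : g = x.1.1
      · subst hg
        show ((stepN n x).getD x.1.1 PySem.Dict.empty).contains a = true ↔ _
        rw [stepN, PySem.Dict.getD_insert_self, PySem.Dict.contains_insert]
        simp only [Bool.or_eq_true, beq_iff_eq]
        constructor
        · rintro (h | h)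
          · exact Or.inr (Prod.ext_iff.mpr ⟨rfl, h.symm⟩)
          · exact Or.inl h
        · rintro (h | h)
          · exact Or.inr h
          · exact Or.inl ((Prod.ext_iff.mp h.symm).2)
      · show ((stepN n x).getD g PySem.Dict.empty).contains a = true ↔ _
        rw [stepN, PySem.Dict.getD_insert_of_ne _ _ _ hg]
        simp only [iff_self_or]
        intro he
        exact absurd (congrArg Prod.fst he.symm) hg
    rw [hstep]
    simp only [List.mem_cons]
    constructor
    · rintro (⟨h | h⟩ | ⟨p, hp, he⟩)
      · exact Or.inl h
      · exact Or.inr ⟨x, Or.inl rfl, h⟩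
      · exact Or.inr ⟨p, Or.inr hp, he⟩
    · rintro (h | ⟨p, (rfl | hp), he⟩)
      · exact Or.inl (Or.inl h)
      · exact Or.inl (Or.inr he)
      · exact Or.inr ⟨p, hp, he⟩

lemma inner_getD_RB_pres (g a : String) :
    ∀ (l : List ((String × String) × Int)) (n : PySem.Dict String (PySem.Dict String Int)),
      (g, a) ∉ l.map (·.1) →
      ((RB l n).getD g PySem.Dict.empty).getD a 0 = (n.getD g PySem.Dict.empty).getD a 0 := by
  intro l
  induction l with
  | nil => intro n _; rfl
  | cons x l ih =>
    intro n hmem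
    simp only [List.map_cons, List.mem_cons] at hmem
    push_neg at hmem
    have hr : RB (x :: l) n = RB l (stepN n x) := rfl
    rw [hr, ih _ hmem.2]
    by_cases hg : g = x.1.1
    · have ha : a ≠ x.1.2 := by
        intro he; exact hmem.1 (by rw [hg, he])
      subst hg
      show ((stepN n x).getD x.1.1 PySem.Dict.empty).getD a 0 = _
      rw [stepN, PySem.Dict.getD_insert_self, PySem.Dict.getD_insert_of_ne _ _ _ ha]
    · show ((stepN n x).getD g PySem.Dict.empty).getD a 0 = _
      rw [stepN, PySem.Dict.getD_insert_of_ne _ _ _ hg]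

lemma inner_getD_RB_of_mem (g a : String) (w : Int) :
    ∀ (l : List ((String × String) × Int)) (n : PySem.Dict String (PySem.Dict String Int)),
      (l.map (·.1)).Nodup → ((g, a), w) ∈ l →
      ((RB l n).getD g PySem.Dict.empty).getD a 0 = w := by
  intro l
  induction l with
  | nil => intro n _ h; simp at h
  | cons x l ih =>
    intro n hnd hmem
    simp only [List.map_cons, List.nodup_cons] at hnd
    have hr : RB (x :: l) n = RB l (stepN n x) := rfl
    rcases List.mem_cons.mp hmem with he | hm
    · subst he
      rw [hr, inner_getD_RB_pres g a l _ hnd.1]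
      show ((stepN n ((g, a), w)).getD g PySem.Dict.empty).getD a 0 = w
      rw [stepN, PySem.Dict.getD_insert_self, PySem.Dict.getD_insert_self]
    · rw [hr]; exact ih _ hnd.2 hm

lemma RB_map_replace (g a : String) (c' : Int) :
    ∀ (l : List ((String × String) × Int)), (l.map (·.1)).Nodup → (g, a) ∈ l.map (·.1) →
      RB (l.map (fun p => if p.1 == (g, a) then ((g, a), c') else p)) PySem.Dict.empty
      = (RB l PySem.Dict.empty).insert g
          (((RB l PySem.Dict.empty).getD g PySem.Dict.empty).insert a c') := by
  intro l
  induction l using List.reverseRecOn with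
  | nil => intro _ h; simp at h
  | append_singleton l p ih =>
    intro hnd hk
    rw [List.map_append, List.nodup_append] at hnd
    rw [List.map_append]
    by_cases hp : (p.1 == (g, a)) = true
    · have hp' : p.1 = (g, a) := beq_iff_eq.mp hp
      have hfresh : (g, a) ∉ l.map (·.1) := by
        intro hm
        exact (hnd.2.2 _ hm p.1 (by simp)) hp'.symm
      have hmapid : l.map (fun q => if q.1 == (g, a) then ((g, a), c') else q) = l :=
        calc l.map (fun q => if q.1 == (g, a) then ((g, a), c') else q)
            = l.map id := List.map_congr_left (fun q hq => by
              have hq1 : (q.1 == (g, a)) = false := by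
                simp only [beq_eq_false_iff_ne, ne_eq]
                intro he; exact hfresh (he ▸ List.mem_map_of_mem hq)
              simp [hq1])
          _ = l := List.map_id l
      simp only [List.map_singleton, hp, if_true, hmapid]
      rw [RB_append_singleton, RB_append_singleton]
      simp only [stepN, hp']
      rw [PySem.Dict.getD_insert_self, PySem.Dict.insert_insert_self,
          PySem.Dict.insert_insert_self]
    · have hp' : p.1 ≠ (g, a) := by simpa using hp
      have hk' : (g, a) ∈ l.map (·.1) := by
        rw [List.map_append] at hk
        rcases List.mem_append.mp hk with h | h
        · exact h
        · simp at h; exact absurd h.symm hp'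
      simp only [List.map_singleton, hp, if_false, Bool.false_eq_true]
      rw [RB_append_singleton, RB_append_singleton, ih hnd.1 hk']
      by_cases hg : p.1.1 = g
      · have ha : p.1.2 ≠ a := fun he => hp' (Prod.ext_iff.mpr ⟨hg, he⟩)
        have hIa : ((RB l PySem.Dict.empty).getD g PySem.Dict.empty).contains a = true := by
          rcases List.mem_map.mp hk' with ⟨q, hq, hq1⟩
          exact (inner_contains_RB g a l PySem.Dict.empty).mpr (Or.inr ⟨q, hq, hq1⟩)
        simp only [stepN, hg]
        rw [PySem.Dict.getD_insert_self, PySem.Dict.getD_insert_self,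
            PySem.Dict.insert_insert_self, PySem.Dict.insert_insert_self]
        exact congrArg _ (insert_insert_comm_of_contains _ c' p.2 hIa ha)
      · have hNg : (RB l PySem.Dict.empty).contains g = true := by
          rcases List.mem_map.mp hk' with ⟨q, hq, hq1⟩
          exact (outer_contains_RB g l PySem.Dict.empty).mpr
            (Or.inr ⟨q, hq, congrArg Prod.fst hq1⟩)
        simp only [stepN]
        rw [PySem.Dict.getD_insert_of_ne _ _ _ hg,
            PySem.Dict.getD_insert_of_ne _ _ _ (Ne.symm hg)]
        exact insert_insert_comm_of_contains _ _ _ hNg hg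

lemma comm_lemma (f : PySem.Dict (String × String) Int) (hf : f.keys.Nodup)
    (a g : String) (v : Int) :
    RB ((f.insert (g, a) (f.getD (g, a) 0 + v)).items) PySem.Dict.empty
      = stepA (RB f.items PySem.Dict.empty) (a, g, v) := by
  by_cases hc : f.contains (g, a) = true
  · have hsome : (f.get? (g, a)).isSome := by
      rw [← PySem.Dict.contains_eq_isSome_get?]; exact hc
    obtain ⟨w, hw⟩ := Option.isSome_iff_exists.mp hsome
    have hmem : ((g, a), w) ∈ f.items := PySem.Dict.mem_items_of_get?_eq_some _ hw
    have hgd : f.getD (g, a) 0 = w := PySem.Dict.getD_of_get?_eq_some _ _ hw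
    have hnd : (f.items.map (·.1)).Nodup := by
      simpa [PySem.Dict.keys] using hf
    have hkmem : (g, a) ∈ f.items.map (·.1) := List.mem_map_of_mem hmem
    rw [PySem.Dict.items_insert_of_contains _ _ hc,
        RB_map_replace g a _ f.items hnd hkmem, stepA]
    simp only
    rw [inner_getD_RB_of_mem g a w f.items _ hnd hmem, hgd]
  · rw [PySem.Dict.items_insert_of_not_contains _ _ (by simpa using hc), RB_append_singleton]
    have h0 : f.getD (g, a) 0 = 0 :=
      PySem.Dict.getD_of_not_contains _ _ (by simpa using hc)
    have hnc : ((RB f.items PySem.Dict.empty).getD g PySem.Dict.empty).contains a ≠ true := by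
      intro h
      rcases (inner_contains_RB g a f.items PySem.Dict.empty).mp h with h' | ⟨p, hp, he⟩
      · simp [PySem.Dict.getD_empty, PySem.Dict.contains_empty] at h'
      · have : (g, a) ∈ f.keys := by
          simp only [PySem.Dict.keys]
          exact he ▸ List.mem_map_of_mem hp
        rw [← PySem.Dict.contains_iff_mem_keys] at this
        exact absurd this hc
    have h0' : ((RB f.items PySem.Dict.empty).getD g PySem.Dict.empty).getD a 0 = 0 :=
      PySem.Dict.getD_of_not_contains _ _ (by simpa using hnc)
    rw [stepN, stepA]
    simp only [h0, h0']

lemma flatD_keys_nodup (P : List (String × String × Int)) : (flatD P).keys.Nodup := by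
  unfold flatD stepF
  exact PySem.Dict.nodup_keys_foldl_insert_key P (fun p => (p.2.1, p.1)) _ _
    (by simp [PySem.Dict.keys_empty])

lemma nestA_eq_RB_flatD (P : List (String × String × Int)) :
    nestA P = RB (flatD P).items PySem.Dict.empty := by
  induction P using List.reverseRecOn with
  | nil => rfl
  | append_singleton P p ih =>
    have hA : nestA (P ++ [p]) = stepA (nestA P) p := by
      simp [nestA, List.foldl_append]
    have hF : flatD (P ++ [p]) = stepF (flatD P) p := by
      simp [flatD, List.foldl_append]
    rw [hA, hF, ih, stepF]
    exact (comm_lemma (flatD P) (flatD_keys_nodup P) p.1 p.2.1 p.2.2).symm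

-- ===== VERDICT (by name: the statement is the Claim_ definition above) =====
theorem dizionario_settimana_spec : Claim_equal_dizionario_settimana := by
  intro P _
  unfold Spec_dizionario_settimana
  show dizionario_settimana P = dizionario_settimana_alt P
  have e1 : P.foldl
      (fun d_settimana prenotazione =>
        let aula := prenotazione.1
        let giorno := prenotazione.2.1
        let prenotati := prenotazione.2.2
        let d := if d_settimana.contains giorno then d_settimana
                 else d_settimana.insert giorno PySem.Dict.empty
        d.insert giorno (aggiungi_in_dizionario (d.getD giorno PySem.Dict.empty) aula 0 prenotati))
      PySem.Dict.empty = nestA P :=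
    PySem.List.foldl_congr_mem P _ _ _ (fun acc x _ => portA_body_eq acc x)
  have e2 : ∀ (l : List ((String × String) × Int)),
      l.foldl
        (fun out it =>
          let giorno := it.1.1
          let aula := it.1.2
          let out' := if out.contains giorno then out else out.insert giorno PySem.Dict.empty
          out'.insert giorno ((out'.getD giorno PySem.Dict.empty).insert aula it.2))
        PySem.Dict.empty = RB l PySem.Dict.empty :=
    fun l => PySem.List.foldl_congr_mem l _ _ _ (fun acc x _ => portB_body_eq acc x)
  show (P.foldl _ PySem.Dict.empty).items.map _
      = ((flatD P).items.foldl _ PySem.Dict.empty).items.map _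
  rw [e1, e2, nestA_eq_RB_flatD]
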